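-- pv_equiv track=rewrite | github.com/eraymerc/projeler | python/crosswordPuzzleSolver/project3_eray_mercan_230102002009.py | decompose_command
-- ===== SOURCE A (Python) =====
-- def decompose_command(str1):
--     direction = "H"
--     str1 = str1.lower()
--
--     isAllInfoAvailable = -4
--
--     wordno = 0
--     coordinates = [0, 0]
--     # operation flag
--     # 0 for word
--     # 1 for row
--     # 2 for column
--     # 3 for direction
--     opFlag = -1
--     for char in str1:
--
--         if char == "w":
--             opFlag = 0
--             isAllInfoAvailable += 1
--             continue
--         elif char == "r":
--             opFlag = 1
--             isAllInfoAvailable += 1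
--             continue
--         elif char == "c":
--             opFlag = 2
--             isAllInfoAvailable += 1
--             continue
--         elif char == "d":
--             opFlag = 3
--             isAllInfoAvailable += 1
--             continue
--
--         if opFlag == 0:
--             if char.isdigit():
--                 wordno = wordno*10 + int(char)
--             continue
--         elif opFlag == 1:
--             if char.isdigit():
--                 coordinates[0] = coordinates[0]*10 + int(char)
--             continue
--         elif opFlag == 2:
--             if char.isdigit():
--                 coordinates[1] = coordinates[1]*10 + int(char)
--             continue
--         elif opFlag == 3:
--             if char == "v":
--                 direction = "V"
--             continue
--
--     if isAllInfoAvailable != 0: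
--         isAllInfoAvailable = -1
--         wordno = None
--         coordinates = None
--         direction = None
--
--     return isAllInfoAvailable, wordno, coordinates, direction
-- ===== SOURCE B (Python) =====
-- def _segments(s):
--     # flag-led segments of s: list of (flag_char, body string); text before the first flag is dropped
--     segs = []
--     i, n = 0, len(s)
--     while i < n:
--         if s[i] in "wrcd":
--             j = i + 1
--             while j < n and s[j] not in "wrcd":
--                 j += 1
--             segs.append((s[i], s[i + 1:j]))
--             i = j
--         else:
--             i += 1
--     return segs
--
--
-- def _val(digs):
--     n = 0
--     for ch in digs:
--         n = n * 10 + ord(ch) - 48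
--     return n
--
--
-- def decompose_command(str1):
--     segs = _segments(str1.lower())
--     if len(segs) != 4:
--         return -1, None, None, None
--     digits = {"w": "", "r": "", "c": ""}
--     vertical = False
--     for flag, body in segs:
--         if flag == "d":
--             vertical = vertical or ("v" in body)
--         else:
--             digits[flag] += "".join(ch for ch in body if ch.isdigit())
--     return 0, _val(digits["w"]), [_val(digits["r"]), _val(digits["c"])], \
--         "V" if vertical else "H"
-- ===== Notes on version B (the rewrite author's own statement) =====
-- stated objective: alternative
-- what changed: B replaces A's per-character five-mode state machine with a two-phase decomposition: it first splits the lowered string into flag-led segments (text before the first flag dropped), then folds the segment list, concatenating each segment's digit characters into per-field strings converted to ints at the end, with direction taken from the d-segments and validity judged by the segment count being 4.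
import Mathlib
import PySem

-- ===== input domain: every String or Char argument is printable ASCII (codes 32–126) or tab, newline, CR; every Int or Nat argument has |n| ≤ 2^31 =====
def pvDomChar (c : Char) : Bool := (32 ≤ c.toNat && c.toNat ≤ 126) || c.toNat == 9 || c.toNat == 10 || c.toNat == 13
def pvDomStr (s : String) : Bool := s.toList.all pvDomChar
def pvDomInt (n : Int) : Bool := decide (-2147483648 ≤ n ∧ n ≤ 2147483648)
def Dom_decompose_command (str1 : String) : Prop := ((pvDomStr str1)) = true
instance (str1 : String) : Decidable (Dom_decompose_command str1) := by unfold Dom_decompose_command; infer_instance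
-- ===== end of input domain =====

-- B re-decomposes the command into flag-led segments instead of A's per-character
-- state machine; objective: alternative decomposition, same cost.
-- (int(char) is ported as toNat-48 under isdigit: exact on the ASCII domain.)

-- ===== PORT A =====
-- A's loop state: (direction, isAllInfoAvailable, wordno, coordinates[0], coordinates[1], opFlag)
def pvStepA (st : String × Int × Int × Int × Int × Int) (c : Char) :
    String × Int × Int × Int × Int × Int :=
  match st with
  | (dir, av, wn, r, co, f) =>
    if c = 'w' then (dir, av + 1, wn, r, co, 0)
    else if c = 'r' then (dir, av + 1, wn, r, co, 1)
    else if c = 'c' then (dir, av + 1, wn, r, co, 2)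
    else if c = 'd' then (dir, av + 1, wn, r, co, 3)
    else if f = 0 then
      (dir, av, if PySem.Chars.isdigit c then wn * 10 + ((c.toNat : Int) - 48) else wn, r, co, f)
    else if f = 1 then
      (dir, av, wn, if PySem.Chars.isdigit c then r * 10 + ((c.toNat : Int) - 48) else r, co, f)
    else if f = 2 then
      (dir, av, wn, r, if PySem.Chars.isdigit c then co * 10 + ((c.toNat : Int) - 48) else co, f)
    else if f = 3 then ((if c = 'v' then "V" else dir), av, wn, r, co, f)
    else (dir, av, wn, r, co, f)

def decompose_command (str1 : String) : Int × Option Int × Option (List Int) × Option String :=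
  let l := PySem.Chars.lower str1.toList
  match l.foldl pvStepA ("H", -4, 0, 0, 0, -1) with
  | (dir, av, wn, r, co, _) =>
    if av ≠ 0 then (-1, none, none, none)
    else (av, some wn, some [r, co], some dir)

-- ===== PORT B =====
def pvIsFlag (c : Char) : Bool := c = 'w' || c = 'r' || c = 'c' || c = 'd'

-- _segments: flag-led segments, text before the first flag dropped
def pvSegs : List Char → List (Char × List Char)
  | [] => []
  | c :: cs =>
    if pvIsFlag c then
      (c, cs.takeWhile (fun x => !pvIsFlag x)) :: pvSegs (cs.dropWhile (fun x => !pvIsFlag x))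
    else pvSegs cs
termination_by l => l.length
decreasing_by
  · have := List.length_dropWhile_le (fun x => !pvIsFlag x) cs
    simp; omega
  · simp

-- _val
def pvVal (ds : List Char) : Int :=
  ds.foldl (fun n ch => n * 10 + ((ch.toNat : Int) - 48)) 0

-- the body of B's per-segment loop (digits dict as three accumulators, vertical flag)
def pvAccB (st : List Char × List Char × List Char × Bool) (seg : Char × List Char) :
    List Char × List Char × List Char × Bool :=
  match st, seg with
  | (wds, rds, cds, v), (f, body) =>
    if f = 'd' then (wds, rds, cds, v || body.contains 'v')
    else if f = 'w' then (wds ++ body.filter PySem.Chars.isdigit, rds, cds, v)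
    else if f = 'r' then (wds, rds ++ body.filter PySem.Chars.isdigit, cds, v)
    else (wds, rds, cds ++ body.filter PySem.Chars.isdigit, v)

def decompose_command_alt (str1 : String) : Int × Option Int × Option (List Int) × Option String :=
  let segs := pvSegs (PySem.Chars.lower str1.toList)
  if segs.length ≠ 4 then (-1, none, none, none)
  else
    match segs.foldl pvAccB ([], [], [], false) with
    | (wds, rds, cds, v) =>
      (0, some (pvVal wds), some [pvVal rds, pvVal cds],
        some (if v then "V" else "H"))

-- ===== PRECONDITION & SPEC =====
def Spec_decompose_command (str1 : String) (out : Int × Option Int × Option (List Int) × Option String) : Prop := out = decompose_command_alt str1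
instance (str1 : String) (out : Int × Option Int × Option (List Int) × Option String) : Decidable (Spec_decompose_command str1 out) := by unfold Spec_decompose_command; infer_instance

-- ===== CLAIM (what is proved, stated in full; the proofs are below) =====
def Claim_equal_decompose_command : Prop := ∀ (str1 : String), Dom_decompose_command str1 → Spec_decompose_command str1 (decompose_command str1)

-- ===== LEMMAS AND PROOFS =====

theorem pvSegs_cons_nonflag (c : Char) (cs : List Char) (h : pvIsFlag c = false) :
    pvSegs (c :: cs) = pvSegs cs := by
  rw [pvSegs]; simp [h]

theorem pvSegs_cons_flag (c : Char) (cs : List Char) (h : pvIsFlag c = true) :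
    pvSegs (c :: cs) =
      (c, cs.takeWhile (fun x => !pvIsFlag x)) :: pvSegs (cs.dropWhile (fun x => !pvIsFlag x)) := by
  rw [pvSegs]; simp [h]

-- A's loop leaves the state alone over non-flag chars while opFlag = -1
theorem pvSkipA (body : List Char) (dir : String) (av wn r co : Int)
    (hb : ∀ c ∈ body, pvIsFlag c = false) :
    body.foldl pvStepA (dir, av, wn, r, co, -1) = (dir, av, wn, r, co, -1) := by
  induction body with
  | nil => rfl
  | cons c cs ih =>
    have hc := hb c (List.mem_cons_self ..)
    simp [pvIsFlag] at hc
    obtain ⟨⟨⟨hfw, hfr⟩, hfc⟩, hfd⟩ := hc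
    simp [List.foldl_cons, pvStepA, hfw, hfr, hfc, hfd]
    exact ih (fun x hx => hb x (List.mem_cons_of_mem _ hx))

-- A's loop over a flagless body in mode 0/1/2/3
theorem pvBodyW (body : List Char) (dir : String) (av wn r co : Int)
    (hb : ∀ c ∈ body, pvIsFlag c = false) :
    body.foldl pvStepA (dir, av, wn, r, co, 0) =
      (dir, av, (body.filter PySem.Chars.isdigit).foldl
        (fun n ch => n * 10 + ((ch.toNat : Int) - 48)) wn, r, co, 0) := by
  induction body generalizing wn with
  | nil => rfl
  | cons c cs ih =>
    have hc := hb c (List.mem_cons_self ..)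
    simp [pvIsFlag] at hc
    obtain ⟨⟨⟨hfw, hfr⟩, hfc⟩, hfd⟩ := hc
    by_cases hd : PySem.Chars.isdigit c = true
    · simp [List.foldl_cons, pvStepA, hfw, hfr, hfc, hfd, hd,
        ih _ (fun x hx => hb x (List.mem_cons_of_mem _ hx))]
    · simp at hd
      simp [List.foldl_cons, pvStepA, hfw, hfr, hfc, hfd, hd,
        ih _ (fun x hx => hb x (List.mem_cons_of_mem _ hx))]

theorem pvBodyR (body : List Char) (dir : String) (av wn r co : Int)
    (hb : ∀ c ∈ body, pvIsFlag c = false) :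
    body.foldl pvStepA (dir, av, wn, r, co, 1) =
      (dir, av, wn, (body.filter PySem.Chars.isdigit).foldl
        (fun n ch => n * 10 + ((ch.toNat : Int) - 48)) r, co, 1) := by
  induction body generalizing r with
  | nil => rfl
  | cons c cs ih =>
    have hc := hb c (List.mem_cons_self ..)
    simp [pvIsFlag] at hc
    obtain ⟨⟨⟨hfw, hfr⟩, hfc⟩, hfd⟩ := hc
    by_cases hd : PySem.Chars.isdigit c = true
    · simp [List.foldl_cons, pvStepA, hfw, hfr, hfc, hfd, hd,
        ih _ (fun x hx => hb x (List.mem_cons_of_mem _ hx))]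
    · simp at hd
      simp [List.foldl_cons, pvStepA, hfw, hfr, hfc, hfd, hd,
        ih _ (fun x hx => hb x (List.mem_cons_of_mem _ hx))]

theorem pvBodyC (body : List Char) (dir : String) (av wn r co : Int)
    (hb : ∀ c ∈ body, pvIsFlag c = false) :
    body.foldl pvStepA (dir, av, wn, r, co, 2) =
      (dir, av, wn, r, (body.filter PySem.Chars.isdigit).foldl
        (fun n ch => n * 10 + ((ch.toNat : Int) - 48)) co, 2) := by
  induction body generalizing co with
  | nil => rfl
  | cons c cs ih =>
    have hc := hb c (List.mem_cons_self ..)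
    simp [pvIsFlag] at hc
    obtain ⟨⟨⟨hfw, hfr⟩, hfc⟩, hfd⟩ := hc
    by_cases hd : PySem.Chars.isdigit c = true
    · simp [List.foldl_cons, pvStepA, hfw, hfr, hfc, hfd, hd,
        ih _ (fun x hx => hb x (List.mem_cons_of_mem _ hx))]
    · simp at hd
      simp [List.foldl_cons, pvStepA, hfw, hfr, hfc, hfd, hd,
        ih _ (fun x hx => hb x (List.mem_cons_of_mem _ hx))]

theorem pvBodyD (body : List Char) (dir : String) (av wn r co : Int)
    (hb : ∀ c ∈ body, pvIsFlag c = false) :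
    body.foldl pvStepA (dir, av, wn, r, co, 3) =
      ((if body.contains 'v' then "V" else dir), av, wn, r, co, 3) := by
  induction body generalizing dir with
  | nil => rfl
  | cons c cs ih =>
    have hc := hb c (List.mem_cons_self ..)
    simp [pvIsFlag] at hc
    obtain ⟨⟨⟨hfw, hfr⟩, hfc⟩, hfd⟩ := hc
    by_cases hv : c = 'v'
    · subst hv
      simp [List.foldl_cons, pvStepA, hfw, hfr, hfc, hfd,
        ih _ (fun x hx => hb x (List.mem_cons_of_mem _ hx))]
    · simp [List.foldl_cons, pvStepA, hfw, hfr, hfc, hfd, hv, Ne.symm hv,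
        ih _ (fun x hx => hb x (List.mem_cons_of_mem _ hx))]

theorem pvVal_append (xs ys : List Char) :
    pvVal (xs ++ ys) = ys.foldl (fun n ch => n * 10 + ((ch.toNat : Int) - 48)) (pvVal xs) := by
  simp [pvVal, List.foldl_append]

theorem pvDropWhile_idem (p : Char → Bool) (l : List Char) :
    List.dropWhile p (List.dropWhile p l) = List.dropWhile p l := by
  induction l with
  | nil => rfl
  | cons a l ih =>
    by_cases h : p a = true
    · simp [h, ih]
    · simp [h]

theorem pvFoldSplit (st : String × Int × Int × Int × Int × Int) (cs : List Char) :
    List.foldl pvStepA st cs =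
      List.foldl pvStepA (List.foldl pvStepA st (cs.takeWhile (fun x => !pvIsFlag x)))
        (cs.dropWhile (fun x => !pvIsFlag x)) := by
  conv_lhs => rw [← List.takeWhile_append_dropWhile (p := fun x => !pvIsFlag x) (l := cs)]
  rw [List.foldl_append]

-- Main invariant: starting at a point of the text aligned with a flag (or at the end),
-- A's scan computes exactly what B computes from the segment list.
theorem pvMain (l : List Char) :
    ∀ (v : Bool) (av : Int) (wds rds cds : List Char) (f : Int),
    ∃ f' : Int,
      (l.dropWhile (fun x => !pvIsFlag x)).foldl pvStepA
          ((if v then "V" else "H"), av, pvVal wds, pvVal rds, pvVal cds, f) =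
        (match (pvSegs l).foldl pvAccB (wds, rds, cds, v) with
         | (wds', rds', cds', v') =>
           ((if v' then "V" else "H"), av + ((pvSegs l).length : Int),
             pvVal wds', pvVal rds', pvVal cds', f')) := by
  induction l using pvSegs.induct with
  | case1 =>
    intro v av wds rds cds f
    refine ⟨f, ?_⟩
    have h0 : pvSegs ([] : List Char) = [] := by rw [pvSegs]
    simp [h0]
  | case2 c cs hflag ih =>
    intro v av wds rds cds f
    have hbody : ∀ x ∈ cs.takeWhile (fun x => !pvIsFlag x), pvIsFlag x = false := by
      intro x hx
      have := List.mem_takeWhile_imp hx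
      simpa using this
    have hdrop : (c :: cs).dropWhile (fun x => !pvIsFlag x) = c :: cs := by
      simp [hflag]
    rw [hdrop, pvSegs_cons_flag c cs hflag]
    have hflag' : c = 'w' ∨ c = 'r' ∨ c = 'c' ∨ c = 'd' := by
      simpa [pvIsFlag, or_assoc] using hflag
    rcases hflag' with hcw | hcr | hcc | hcd
    · -- c = 'w'
      subst hcw
      obtain ⟨f', hrec⟩ := ih v (av + 1)
        (wds ++ (cs.takeWhile (fun x => !pvIsFlag x)).filter PySem.Chars.isdigit) rds cds 0
      rw [pvDropWhile_idem] at hrec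
      refine ⟨f', ?_⟩
      rw [List.foldl_cons]
      have hstep : pvStepA ((if v then "V" else "H"), av, pvVal wds, pvVal rds, pvVal cds, f) 'w'
          = ((if v then "V" else "H"), av + 1, pvVal wds, pvVal rds, pvVal cds, 0) := by
        simp [pvStepA]
      rw [hstep, pvFoldSplit, pvBodyW _ _ _ _ _ _ hbody, ← pvVal_append, hrec]
      rcases hacc : (pvSegs (cs.dropWhile (fun x => !pvIsFlag x))).foldl pvAccB
          (wds ++ (cs.takeWhile (fun x => !pvIsFlag x)).filter PySem.Chars.isdigit, rds, cds, v)
        with ⟨w2, r2, c2, v2⟩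
      simp [pvAccB, hacc, Prod.ext_iff]
      omega
    · -- c = 'r'
      subst hcr
      obtain ⟨f', hrec⟩ := ih v (av + 1)
        wds (rds ++ (cs.takeWhile (fun x => !pvIsFlag x)).filter PySem.Chars.isdigit) cds 1
      rw [pvDropWhile_idem] at hrec
      refine ⟨f', ?_⟩
      rw [List.foldl_cons]
      have hstep : pvStepA ((if v then "V" else "H"), av, pvVal wds, pvVal rds, pvVal cds, f) 'r'
          = ((if v then "V" else "H"), av + 1, pvVal wds, pvVal rds, pvVal cds, 1) := by
        simp [pvStepA]
      rw [hstep, pvFoldSplit, pvBodyR _ _ _ _ _ _ hbody, ← pvVal_append, hrec]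
      rcases hacc : (pvSegs (cs.dropWhile (fun x => !pvIsFlag x))).foldl pvAccB
          (wds, rds ++ (cs.takeWhile (fun x => !pvIsFlag x)).filter PySem.Chars.isdigit, cds, v)
        with ⟨w2, r2, c2, v2⟩
      simp [pvAccB, hacc, Prod.ext_iff]
      omega
    · -- c = 'c'
      subst hcc
      obtain ⟨f', hrec⟩ := ih v (av + 1)
        wds rds (cds ++ (cs.takeWhile (fun x => !pvIsFlag x)).filter PySem.Chars.isdigit) 2
      rw [pvDropWhile_idem] at hrec
      refine ⟨f', ?_⟩
      rw [List.foldl_cons]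
      have hstep : pvStepA ((if v then "V" else "H"), av, pvVal wds, pvVal rds, pvVal cds, f) 'c'
          = ((if v then "V" else "H"), av + 1, pvVal wds, pvVal rds, pvVal cds, 2) := by
        simp [pvStepA]
      rw [hstep, pvFoldSplit, pvBodyC _ _ _ _ _ _ hbody, ← pvVal_append, hrec]
      rcases hacc : (pvSegs (cs.dropWhile (fun x => !pvIsFlag x))).foldl pvAccB
          (wds, rds, cds ++ (cs.takeWhile (fun x => !pvIsFlag x)).filter PySem.Chars.isdigit, v)
        with ⟨w2, r2, c2, v2⟩
      simp [pvAccB, hacc, Prod.ext_iff]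
      omega
    · -- c = 'd'
      subst hcd
      obtain ⟨f', hrec⟩ := ih
        (v || (cs.takeWhile (fun x => !pvIsFlag x)).contains 'v') (av + 1) wds rds cds 3
      rw [pvDropWhile_idem] at hrec
      refine ⟨f', ?_⟩
      rw [List.foldl_cons]
      have hstep : pvStepA ((if v then "V" else "H"), av, pvVal wds, pvVal rds, pvVal cds, f) 'd'
          = ((if v then "V" else "H"), av + 1, pvVal wds, pvVal rds, pvVal cds, 3) := by
        simp [pvStepA]
      have hdir : (if (cs.takeWhile (fun x => !pvIsFlag x)).contains 'v' then "V"
            else (if v then "V" else "H"))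
          = (if (v || (cs.takeWhile (fun x => !pvIsFlag x)).contains 'v') then "V" else "H") := by
        cases v <;> cases h2 : (cs.takeWhile (fun x => !pvIsFlag x)).contains 'v' <;> simp
      rw [hstep, pvFoldSplit, pvBodyD _ _ _ _ _ _ hbody, hdir, hrec]
      rcases hacc : (pvSegs (cs.dropWhile (fun x => !pvIsFlag x))).foldl pvAccB
          (wds, rds, cds, v || (cs.takeWhile (fun x => !pvIsFlag x)).contains 'v')
        with ⟨w2, r2, c2, v2⟩
      simp only [List.contains_eq_mem] at hacc
      simp [pvAccB, hacc, Prod.ext_iff]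
      omega
  | case3 c cs hflag ih =>
    intro v av wds rds cds f
    have hc : pvIsFlag c = false := by simpa using hflag
    have hdrop : (c :: cs).dropWhile (fun x => !pvIsFlag x) = cs.dropWhile (fun x => !pvIsFlag x) := by
      simp [hc]
    rw [hdrop, pvSegs_cons_nonflag c cs hc]
    exact ih v av wds rds cds f

-- ===== VERDICT (by name: the statement is the Claim_ definition above) =====
theorem decompose_command_spec : Claim_equal_decompose_command := by
  intro str1 _hdom
  unfold Spec_decompose_command decompose_command decompose_command_alt
  obtain ⟨f', hmain⟩ := pvMain (PySem.Chars.lower str1.toList) false (-4) [] [] [] (-1)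
  simp only [pvVal, List.foldl_nil, Bool.false_eq_true, if_false] at hmain
  have hskip : (List.takeWhile (fun x => !pvIsFlag x)
        (PySem.Chars.lower str1.toList)).foldl pvStepA ("H", -4, 0, 0, 0, -1)
      = ("H", -4, 0, 0, 0, -1) :=
    pvSkipA _ _ _ _ _ _ (fun c hc => by simpa using List.mem_takeWhile_imp hc)
  have hfold : (PySem.Chars.lower str1.toList).foldl pvStepA ("H", -4, 0, 0, 0, -1)
      = (List.dropWhile (fun x => !pvIsFlag x)
          (PySem.Chars.lower str1.toList)).foldl pvStepA ("H", -4, 0, 0, 0, -1) := by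
    rw [pvFoldSplit, hskip]
  rcases hacc : (pvSegs (PySem.Chars.lower str1.toList)).foldl pvAccB ([], [], [], false)
    with ⟨w2, r2, c2, v2⟩
  rw [hacc] at hmain
  dsimp only at hmain
  dsimp only
  rw [hfold, hmain]
  by_cases hn : (pvSegs (PySem.Chars.lower str1.toList)).length = 4
  · simp [hn, hacc, pvVal]
  · have hne : (-4 : Int) + ((pvSegs (PySem.Chars.lower str1.toList)).length : Int) ≠ 0 := by
      omega
    simp [hn, hne]
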